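-- pv_equiv track=rewrite | github.com/AniAnexiaz/Janus_WayDiff | waydiff/core/extractor.py | extract_security_headers
-- ===== SOURCE A (Python) =====
-- def extract_security_headers(headers: dict | None):
--     """
--     Extract only security-relevant headers for drift analysis.
--     """
--
--     if not headers:
--         return {}
--
--     normalized = {k.lower(): v for k, v in headers.items()}
--
--     relevant_headers = [
--         "content-security-policy",
--         "strict-transport-security",
--         "x-frame-options",
--         "x-content-type-options",
--         "referrer-policy",
--         "permissions-policy",
--         "server",
--         "set-cookie"
--     ]
--
--     extracted = {}
--
--     for key in relevant_headers:
--         if key in normalized: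
--             extracted[key] = normalized[key]
--
--     return extracted
-- ===== SOURCE B (Python) =====
-- _RELEVANT = [
--     "content-security-policy",
--     "strict-transport-security",
--     "x-frame-options",
--     "x-content-type-options",
--     "referrer-policy",
--     "permissions-policy",
--     "server",
--     "set-cookie",
-- ]
--
--
-- def extract_security_headers(headers: dict | None):
--     """Extract only security-relevant headers for drift analysis."""
--     if not headers:
--         return {}
--     slots = [None] * len(_RELEVANT)
--     for k, v in headers.items():
--         try:
--             i = _RELEVANT.index(k.lower())
--         except ValueError:
--             continue
--         slots[i] = (v,)
--     return {key: s[0] for key, s in zip(_RELEVANT, slots) if s is not None}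
-- ===== Notes on version B (the rewrite author's own statement) =====
-- stated objective: alternative
-- what changed: B replaces A's two staged dict passes (build a fully lowercased copy of the input, then loop over the fixed key list probing it) by a single pass over the input that fills a fixed 8-slot array indexed by the key's position in the relevant list, assembling the result afterwards by zipping the key list with the slots.
import Mathlib
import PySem

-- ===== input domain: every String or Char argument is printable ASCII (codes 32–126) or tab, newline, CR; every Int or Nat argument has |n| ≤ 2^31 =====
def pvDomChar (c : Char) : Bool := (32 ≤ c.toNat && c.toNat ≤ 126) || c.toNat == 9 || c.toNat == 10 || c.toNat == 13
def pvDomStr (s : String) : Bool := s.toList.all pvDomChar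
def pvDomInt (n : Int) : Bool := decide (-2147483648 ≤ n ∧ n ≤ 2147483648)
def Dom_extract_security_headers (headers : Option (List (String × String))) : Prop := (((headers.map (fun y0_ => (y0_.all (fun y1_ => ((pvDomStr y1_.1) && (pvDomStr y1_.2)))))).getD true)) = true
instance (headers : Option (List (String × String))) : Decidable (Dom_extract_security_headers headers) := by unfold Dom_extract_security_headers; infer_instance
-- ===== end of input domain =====

-- B replaces A's two staged dict passes by a single pass over the input filling a fixed
-- 8-slot array indexed by the key's position in the relevant list (alternative decomposition).

-- ===== PORT A =====
def extract_security_headers (headers : Option (List (String × String))) : List (String × String) :=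
  match headers with
  | none => []
  | some hs =>
    if hs = [] then []
    else
      let normalized : PySem.Dict String String :=
        hs.foldl (fun d p => d.insert (PySem.Str.lower p.1) p.2) PySem.Dict.empty
      let relevant_headers : List String :=
        ["content-security-policy", "strict-transport-security", "x-frame-options",
         "x-content-type-options", "referrer-policy", "permissions-policy",
         "server", "set-cookie"]
      (relevant_headers.foldl
        (fun ex key =>
          match normalized.get? key with
          | some v => ex.insert key v
          | none => ex) PySem.Dict.empty).items

-- ===== PORT B =====
-- module-level _RELEVANT
def pvRelevant : List String :=
  ["content-security-policy", "strict-transport-security", "x-frame-options",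
   "x-content-type-options", "referrer-policy", "permissions-policy",
   "server", "set-cookie"]

-- loop body: 'try: i = _RELEVANT.index(k.lower()) except ValueError: continue; slots[i] = (v,)'
-- (_RELEVANT.index succeeds exactly when index? is some, so slots[i] = … is List.set at i)
def pvSlotStep (slots : List (Option String)) (p : String × String) : List (Option String) :=
  match PySem.List.index? pvRelevant (PySem.Str.lower p.1) with
  | some i => slots.set i (some p.2)
  | none => slots

def extract_security_headers_alt (headers : Option (List (String × String))) : List (String × String) :=
  match headers with
  | none => []
  | some hs =>
    if hs = [] then []
    else
      let slots := hs.foldl pvSlotStep (List.replicate pvRelevant.length (none : Option String))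
      (pvRelevant.zip slots).foldl
        (fun out q =>
          match q.2 with
          | some v => out ++ [(q.1, v)]
          | none => out) []

-- ===== PRECONDITION & SPEC =====
def Spec_extract_security_headers (headers : Option (List (String × String))) (out : List (String × String)) : Prop := out = extract_security_headers_alt headers
instance (headers : Option (List (String × String))) (out : List (String × String)) : Decidable (Spec_extract_security_headers headers out) := by unfold Spec_extract_security_headers; infer_instance

-- ===== CLAIM (what is proved, stated in full; the proofs are below) =====
def Claim_equal_extract_security_headers : Prop := ∀ (headers : Option (List (String × String))), Dom_extract_security_headers headers → Spec_extract_security_headers headers (extract_security_headers headers)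

-- ===== LEMMAS AND PROOFS =====

-- setting index i in a map over a nodup list = map with the function updated at l[i]
theorem pv_set_map {α β : Type} [DecidableEq α] (l : List α) (f : α → β) (i : Nat) (b : β)
    (hi : i < l.length) (hnd : l.Nodup) :
    (l.map f).set i b = l.map (fun k => if k = l[i] then b else f k) := by
  apply List.ext_getElem
  · simp
  · intro j h1 h2
    have hlen : j < l.length := by simpa using h2
    simp only [List.getElem_set, List.getElem_map]
    by_cases hj : i = j
    · subst hj; simp
    · have hne : l[j] ≠ l[i] := by
        intro he
        exact hj (((List.Nodup.getElem_inj_iff hnd).mp he).symm)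
      simp [hj, hne]

-- one loop iteration on slots of the shape 'pvRelevant.map f'
theorem pvSlotStep_map (f : String → Option String) (a : String × String) :
    pvSlotStep (pvRelevant.map f) a
      = pvRelevant.map (fun k =>
          ((if PySem.Str.lower a.1 == k then some a.2 else none).or (f k))) := by
  unfold pvSlotStep
  cases hidx : PySem.List.index? pvRelevant (PySem.Str.lower a.1) with
  | none =>
    have hmem : PySem.Str.lower a.1 ∉ pvRelevant := by
      rw [← PySem.List.index?_eq_none_iff (xs := pvRelevant)]
      exact hidx
    symm
    apply List.map_congr_left
    intro k hk
    have hne : (PySem.Str.lower a.1 == k) = false := by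
      simp only [beq_eq_false_iff_ne]
      rintro rfl
      exact hmem hk
    simp [hne]
  | some i =>
    obtain ⟨hi, hval, _⟩ := PySem.List.getElem_of_index?_eq_some hidx
    dsimp only
    rw [pv_set_map _ _ _ _ hi (by decide)]
    apply List.map_congr_left
    intro k hk
    by_cases hk2 : k = PySem.Str.lower a.1
    · simp [hval, hk2]
    · have hne : (PySem.Str.lower a.1 == k) = false := by
        simp only [beq_eq_false_iff_ne]
        exact fun h => hk2 h.symm
      simp [hval, hk2, hne]

-- the slot-filling fold computes, per relevant key, the last case-insensitive match
theorem pvSlotFold_map (hs : List (String × String)) :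
    ∀ f : String → Option String,
    hs.foldl pvSlotStep (pvRelevant.map f)
      = pvRelevant.map (fun k =>
          ((hs.reverse.find? (fun p => PySem.Str.lower p.1 == k)).map (·.2)).or (f k)) := by
  induction hs with
  | nil => intro f; simp
  | cons a rest ih =>
    intro f
    simp only [List.foldl_cons]
    rw [pvSlotStep_map, ih]
    apply List.map_congr_left
    intro k hk
    simp only [List.reverse_cons, List.find?_append]
    cases hrest : rest.reverse.find? (fun p => PySem.Str.lower p.1 == k) with
    | some p => simp
    | none =>
      cases hcmp : (PySem.Str.lower a.1 == k) <;> simp [List.find?, hcmp]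

-- lookup in A's fold-built lowercased dict = last case-insensitive match in the list
theorem get?_normFold (hs : List (String × String)) (key : String) :
    ∀ d : PySem.Dict String String,
    (hs.foldl (fun d p => d.insert (PySem.Str.lower p.1) p.2) d).get? key
      = ((hs.reverse.find? (fun p => PySem.Str.lower p.1 == key)).map (·.2)).or (d.get? key) := by
  induction hs with
  | nil => intro d; simp
  | cons a rest ih =>
    intro d
    simp only [List.foldl_cons, List.reverse_cons, List.find?_append]
    rw [ih]
    cases h : rest.reverse.find? (fun p => PySem.Str.lower p.1 == key) with
    | some p => simp
    | none =>
      by_cases hk : key = PySem.Str.lower a.1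
      · simp [List.find?, hk, PySem.Dict.get?_insert_self]
      · have : (PySem.Str.lower a.1 == key) = false := by
          simp [BEq.beq]; exact fun h' => hk h'.symm
        simp [List.find?, this, PySem.Dict.get?_insert_of_ne _ _ hk]

-- A's dict-building fold over distinct fresh keys has the same items as a list-appending fold
theorem fold_items (f : String → Option String) :
    ∀ (ks : List String) (ex : PySem.Dict String String),
    ex.keys.Nodup → (∀ k ∈ ks, ex.contains k = false) → ks.Nodup →
    (ks.foldl (fun ex key =>
        match f key with
        | some v => ex.insert key v
        | none => ex) ex).items
      = ks.foldl (fun out key =>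
          match f key with
          | some v => out ++ [(key, v)]
          | none => out) ex.items := by
  intro ks
  induction ks with
  | nil => intro ex _ _ _; rfl
  | cons a rest ih =>
    intro ex hnd hfresh hks
    simp only [List.foldl_cons]
    cases hfa : f a with
    | none =>
      exact ih ex hnd (fun k hk => hfresh k (List.mem_cons_of_mem _ hk)) (List.Nodup.of_cons hks)
    | some v =>
      have hca : ex.contains a = false := hfresh a (List.mem_cons_self)
      rw [ih (ex.insert a v)
        (PySem.Dict.nodup_keys_insert _ _ _ hnd)
        (fun k hk => by
          rw [PySem.Dict.contains_insert]
          have hne : k ≠ a := fun h => (List.nodup_cons.mp hks).1 (h ▸ hk)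
          simp [hne, hfresh k (List.mem_cons_of_mem _ hk)])
        (List.Nodup.of_cons hks)]
      rw [PySem.Dict.items_insert_of_not_contains _ _ hca]

-- ===== VERDICT (by name: the statement is the Claim_ definition above) =====
theorem extract_security_headers_spec : Claim_equal_extract_security_headers := by
  intro headers _
  unfold Spec_extract_security_headers extract_security_headers extract_security_headers_alt
  match headers with
  | none => rfl
  | some hs =>
    by_cases hnil : hs = []
    · simp [hnil]
    · simp only [hnil, if_false]
      -- A side: items of the dict fold = appending fold over the relevant keys
      rw [fold_items (fun key =>
            (hs.foldl (fun d p => d.insert (PySem.Str.lower p.1) p.2) PySem.Dict.empty).get? key)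
          _ _ (by simp) (by simp [PySem.Dict.contains_empty]) (by decide)]
      have hitems : (PySem.Dict.empty : PySem.Dict String String).items = [] := rfl
      rw [hitems]
      -- B side: slots fold = map of last matches; then zip-with-self = map of pairs
      rw [show (List.replicate pvRelevant.length (none : Option String))
            = pvRelevant.map (fun _ => none) by simp]
      rw [pvSlotFold_map]
      have hz : pvRelevant.zip (pvRelevant.map (fun k =>
            ((hs.reverse.find? (fun p => PySem.Str.lower p.1 == k)).map (·.2)).or none))
          = pvRelevant.map (fun k => (k,
            ((hs.reverse.find? (fun p => PySem.Str.lower p.1 == k)).map (·.2)).or none)) := by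
        conv_lhs => rw [← List.map_id pvRelevant]
        exact List.zip_map'
      rw [hz, List.foldl_map]
      show List.foldl _ [] pvRelevant = List.foldl _ [] pvRelevant
      apply PySem.List.foldl_congr_mem
      intro out key hk
      rw [get?_normFold]
      simp [PySem.Dict.get?_empty]
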